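-- pv_equiv track=rewrite | github.com/s2mLab/EKF_multicamera | dd_analysis.py | merge_close_regions
-- ===== SOURCE A (Python) =====
-- def merge_close_regions(regions: list[tuple[int, int]], max_gap_frames: int) -> list[tuple[int, int]]:
--     if not regions:
--         return []
--     merged = [list(regions[0])]
--     for start, end in regions[1:]:
--         if start - merged[-1][1] - 1 <= max_gap_frames:
--             merged[-1][1] = end
--         else:
--             merged.append([start, end])
--     return [(start, end) for start, end in merged]
-- ===== SOURCE B (Python) =====
-- def merge_close_regions(regions: list[tuple[int, int]], max_gap_frames: int) -> list[tuple[int, int]]: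
--     if not regions:
--         return []
--     n = len(regions)
--     breaks = [i for i in range(1, n)
--               if regions[i][0] - regions[i - 1][1] - 1 > max_gap_frames]
--     bounds = [0] + breaks + [n]
--     return [(regions[a][0], regions[b - 1][1])
--             for a, b in zip(bounds, bounds[1:])]
-- ===== Notes on version B (the rewrite author's own statement) =====
-- stated objective: alternative
-- what changed: Replaces A's incremental loop that grows a 'merged' accumulator and mutates its last element with a staged computation: one pass collects the break indices where the inter-region gap exceeds max_gap_frames, the input is then sliced at those indices and each slice is emitted as (first start, last end).
import Mathlib
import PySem

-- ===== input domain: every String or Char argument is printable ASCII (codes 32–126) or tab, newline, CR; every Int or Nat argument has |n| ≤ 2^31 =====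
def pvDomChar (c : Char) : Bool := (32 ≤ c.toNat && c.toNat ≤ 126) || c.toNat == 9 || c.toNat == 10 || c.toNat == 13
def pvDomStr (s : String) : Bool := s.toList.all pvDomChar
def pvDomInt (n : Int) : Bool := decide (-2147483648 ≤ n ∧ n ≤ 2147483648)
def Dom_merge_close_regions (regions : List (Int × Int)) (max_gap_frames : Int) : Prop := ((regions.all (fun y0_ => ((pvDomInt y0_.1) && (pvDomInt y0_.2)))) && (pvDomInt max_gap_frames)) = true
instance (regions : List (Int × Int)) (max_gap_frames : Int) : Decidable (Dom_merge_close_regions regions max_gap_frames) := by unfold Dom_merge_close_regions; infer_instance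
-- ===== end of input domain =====

-- B replaces A's incremental accumulator loop with a staged computation (collect break
-- indices, slice at them, emit (first start, last end) per slice); alternative decomposition, same cost.


-- ===== PORT A =====
-- one loop step of A: merged[-1][1] = end  or  merged.append([start, end])
def mergeStepA (max_gap_frames : Int) (merged : List (Int × Int)) (se : Int × Int) : List (Int × Int) :=
  match merged.getLast? with
  | some last =>
      if se.1 - last.2 - 1 ≤ max_gap_frames then
        merged.dropLast ++ [(last.1, se.2)]
      else
        merged ++ [se]
  | none => merged ++ [se]  -- unreachable: merged starts nonempty and never shrinks to []

def merge_close_regions (regions : List (Int × Int)) (max_gap_frames : Int) : List (Int × Int) :=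
  match regions with
  | [] => []
  | r0 :: rest =>
      let merged := rest.foldl (mergeStepA max_gap_frames) [(r0.1, r0.2)]
      merged.map (fun p => (p.1, p.2))

-- ===== PORT B =====
-- Source B's break predicate: regions[i][0] - regions[i-1][1] - 1 > max_gap_frames
def breakAt (regions : List (Int × Int)) (max_gap_frames : Int) (i : Nat) : Bool :=
  decide ((regions.getD i (0,0)).1 - (regions.getD (i - 1) (0,0)).2 - 1 > max_gap_frames)

def merge_close_regions_alt (regions : List (Int × Int)) (max_gap_frames : Int) : List (Int × Int) :=
  match regions with
  | [] => []
  | _ :: _ =>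
      let n := regions.length
      let breaks := (List.range' 1 (n - 1)).filter (breakAt regions max_gap_frames)
      let bounds := 0 :: (breaks ++ [n])
      (bounds.zip bounds.tail).map
        (fun ab => ((regions.getD ab.1 (0,0)).1, (regions.getD (ab.2 - 1) (0,0)).2))

-- ===== PRECONDITION & SPEC =====
def Spec_merge_close_regions (regions : List (Int × Int)) (max_gap_frames : Int) (out : List (Int × Int)) : Prop := out = merge_close_regions_alt regions max_gap_frames
instance (regions : List (Int × Int)) (max_gap_frames : Int) (out : List (Int × Int)) : Decidable (Spec_merge_close_regions regions max_gap_frames out) := by unfold Spec_merge_close_regions; infer_instance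

-- ===== CLAIM (what is proved, stated in full; the proofs are below) =====
def Claim_equal_merge_close_regions : Prop := ∀ (regions : List (Int × Int)) (max_gap_frames : Int), Dom_merge_close_regions regions max_gap_frames → Spec_merge_close_regions regions max_gap_frames (merge_close_regions regions max_gap_frames)

-- ===== LEMMAS AND PROOFS =====

-- intermediate run-at-a-time recursion both ports are reduced to
def splitFirst (g : Int) (prev_end : Int) : List (Int × Int) → Int × List (Int × Int)
  | [] => (prev_end, [])
  | r :: rs =>
      if r.1 - prev_end - 1 ≤ g then splitFirst g r.2 rs
      else (prev_end, r :: rs)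

theorem splitFirst_len (g pe : Int) (rs : List (Int × Int)) :
    (splitFirst g pe rs).2.length ≤ rs.length := by
  induction rs generalizing pe with
  | nil => simp [splitFirst]
  | cons r rs ih =>
      simp only [splitFirst]
      split
      · exact Nat.le_succ_of_le (ih r.2)
      · simp

def goRuns (g : Int) : List (Int × Int) → List (Int × Int)
  | [] => []
  | r :: rs =>
      (r.1, (splitFirst g r.2 rs).1) :: goRuns g (splitFirst g r.2 rs).2
termination_by rs => rs.length
decreasing_by exact Nat.lt_succ_of_le (splitFirst_len _ _ _)

-- ===== A-side: A's fold equals the run recursion =====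

-- folding A's step over a state with a known last element only touches that last element
theorem foldl_mergeStepA_prefix (g : Int) (rs : List (Int × Int)) (acc : List (Int × Int)) (a b : Int) :
    rs.foldl (mergeStepA g) (acc ++ [(a, b)]) = acc ++ rs.foldl (mergeStepA g) [(a, b)] := by
  induction rs generalizing acc a b with
  | nil => simp
  | cons se rs ih =>
      obtain ⟨s, e⟩ := se
      simp only [List.foldl_cons]
      have hstep : mergeStepA g (acc ++ [(a, b)]) (s, e) =
          if s - b - 1 ≤ g then acc ++ [(a, e)] else (acc ++ [(a, b)]) ++ [(s, e)] := by
        simp [mergeStepA]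
      have hstep1 : mergeStepA g [(a, b)] (s, e) =
          if s - b - 1 ≤ g then [(a, e)] else [(a, b), (s, e)] := by
        simp [mergeStepA]
      rw [hstep, hstep1]
      by_cases h : s - b - 1 ≤ g
      · simp only [if_pos h]
        exact ih acc a e
      · simp only [if_neg h]
        rw [ih (acc ++ [(a, b)]) s e]
        have h2 := ih [(a, b)] s e
        simp only [List.cons_append, List.nil_append] at h2
        rw [h2]
        simp

theorem foldl_eq_goRuns (g : Int) (rs : List (Int × Int)) (a b : Int) :
    rs.foldl (mergeStepA g) [(a, b)] =
      (a, (splitFirst g b rs).1) :: goRuns g (splitFirst g b rs).2 := by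
  induction rs generalizing a b with
  | nil => simp [splitFirst, goRuns]
  | cons se rs ih =>
      simp only [List.foldl_cons, splitFirst]
      have hstep1 : mergeStepA g [(a, b)] se =
          if se.1 - b - 1 ≤ g then [(a, se.2)] else [(a, b), se] := by
        simp [mergeStepA]
      rw [hstep1]
      by_cases h : se.1 - b - 1 ≤ g
      · simp only [if_pos h]
        exact ih a se.2
      · simp only [if_neg h]
        rw [show [(a, b), se] = [(a,b)] ++ [(se.1, se.2)] by simp]
        rw [foldl_mergeStepA_prefix, ih se.1 se.2]
        rw [goRuns]
        simp


-- ===== B-side: the break/slice computation equals the run recursion =====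

-- the pair-emitting function of Source B's final comprehension
def emitF (regions : List (Int × Int)) (ab : Nat × Nat) : Int × Int :=
  ((regions.getD ab.1 (0,0)).1, (regions.getD (ab.2 - 1) (0,0)).2)

theorem alt_unfold (g : Int) (r : Int × Int) (xs : List (Int × Int)) :
    merge_close_regions_alt (r :: xs) g =
      ((0 :: (((List.range' 1 xs.length).filter (breakAt (r :: xs) g)) ++ [xs.length + 1])).zip
        (((List.range' 1 xs.length).filter (breakAt (r :: xs) g)) ++ [xs.length + 1])).map
        (emitF (r :: xs)) := by
  simp [merge_close_regions_alt, emitF]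

theorem breakAt_cons_succ (g : Int) (r : Int × Int) (xs : List (Int × Int)) (i : Nat)
    (h : 1 ≤ i) : breakAt (r :: xs) g (i + 1) = breakAt xs g i := by
  obtain ⟨j, rfl⟩ : ∃ j, i = j + 1 := ⟨i - 1, by omega⟩
  simp [breakAt]

theorem range'_two_eq_map (m : Nat) :
    List.range' 2 m = (List.range' 1 m).map (· + 1) := by
  have h : List.map (fun x => 1 + x) (List.range' 1 m) = List.range' (1 + 1) m :=
    List.map_add_range' (a := 1) 1 m 1
  rw [show (2 : Nat) = 1 + 1 from rfl, ← h]
  exact (List.map_congr_left (fun i _ => by omega)).symm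

-- peel one leading region off the break-index list
theorem breaks_cons (g : Int) (r0 : Int × Int) (xs : List (Int × Int)) (hxs : xs ≠ []) :
    (List.range' 1 xs.length).filter (breakAt (r0 :: xs) g) =
      (if breakAt (r0 :: xs) g 1 then [1] else []) ++
        ((List.range' 1 (xs.length - 1)).filter (breakAt xs g)).map (· + 1) := by
  obtain ⟨y, ys, rfl⟩ : ∃ y ys, xs = y :: ys := by
    cases xs with
    | nil => exact absurd rfl hxs
    | cons y ys => exact ⟨y, ys, rfl⟩
  have h1 : List.range' 1 (y :: ys).length = 1 :: List.range' 2 ys.length := by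
    simp [List.range'_succ]
  rw [h1, List.filter_cons, range'_two_eq_map, List.filter_map]
  have h2 : ∀ i ∈ List.range' 1 ys.length,
      (breakAt (r0 :: y :: ys) g ∘ (· + 1)) i = breakAt (y :: ys) g i := by
    intro i hi
    have : 1 ≤ i := (List.mem_range'_1.mp hi).1
    exact breakAt_cons_succ g r0 (y :: ys) i this
  rw [List.filter_congr h2]
  split_ifs <;> simp

-- emitting via (r0 :: xs) at shifted index pairs = emitting via xs
theorem emit_shift (r0 : Int × Int) (xs : List (Int × Int)) (l : List (Nat × Nat))
    (h : ∀ p ∈ l, 1 ≤ p.2) :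
    (l.map (Prod.map (· + 1) (· + 1))).map (emitF (r0 :: xs)) = l.map (emitF xs) := by
  rw [List.map_map]
  apply List.map_congr_left
  intro p hp
  obtain ⟨a, b⟩ := p
  have hb : 1 ≤ b := h (a, b) hp
  obtain ⟨c, rfl⟩ : ∃ c, b = c + 1 := ⟨b - 1, by omega⟩
  simp [emitF, Prod.map]

theorem mem_t_ge_one (g : Int) (xs : List (Int × Int)) (hxs : xs ≠ []) (u : Nat)
    (hu : u ∈ ((List.range' 1 (xs.length - 1)).filter (breakAt xs g)) ++ [xs.length]) :
    1 ≤ u := by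
  rcases List.mem_append.mp hu with h | h
  · exact (List.mem_range'_1.mp (List.mem_of_mem_filter h)).1
  · simp at h
    subst h
    cases xs with
    | nil => exact absurd rfl hxs
    | cons y ys => simp

theorem alt_cons_break (g : Int) (r0 r1 : Int × Int) (rs : List (Int × Int))
    (h : ¬ (r1.1 - r0.2 - 1 ≤ g)) :
    merge_close_regions_alt (r0 :: r1 :: rs) g
      = (r0.1, r0.2) :: merge_close_regions_alt (r1 :: rs) g := by
  have hbr : breakAt (r0 :: r1 :: rs) g 1 = true := by
    simp only [breakAt, show (1 : Nat) - 1 = 0 from rfl, List.getD_cons_succ,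
      List.getD_cons_zero, decide_eq_true_eq]
    omega
  rw [alt_unfold g r0 (r1 :: rs), alt_unfold g r1 rs,
      breaks_cons g r0 (r1 :: rs) (by simp), hbr]
  have hlen : (r1 :: rs).length = rs.length + 1 := rfl
  rw [hlen]
  simp only [if_true, Nat.add_sub_cancel]
  set B' := (List.range' 1 rs.length).filter (breakAt (r1 :: rs) g) with hB
  set t : List Nat := B' ++ [rs.length + 1] with ht
  have hshape : ([1] ++ B'.map (· + 1)) ++ [rs.length + 1 + 1]
      = 1 :: t.map (· + 1) := by
    simp [ht]
  rw [hshape, List.zip_cons_cons, List.map_cons]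
  rw [show ((1 : Nat) :: t.map (· + 1)) = (0 :: t).map (· + 1) from by simp]
  rw [List.zip_map, List.map_map]
  have hmem : ∀ p ∈ (0 :: t).zip t, 1 ≤ p.2 := by
    intro p hp
    exact mem_t_ge_one g (r1 :: rs) (by simp) p.2
      (by simpa [ht, hB] using (List.of_mem_zip hp).2)
  have hes := emit_shift r0 (r1 :: rs) ((0 :: t).zip t) hmem
  rw [List.map_map] at hes
  rw [hes]
  simp [emitF]

theorem alt_cons_close (g : Int) (r0 r1 : Int × Int) (rs : List (Int × Int))
    (h : r1.1 - r0.2 - 1 ≤ g) :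
    merge_close_regions_alt (r0 :: r1 :: rs) g
      = (r0.1, ((merge_close_regions_alt (r1 :: rs) g).headD (0, 0)).2)
          :: (merge_close_regions_alt (r1 :: rs) g).tail := by
  have hbr : breakAt (r0 :: r1 :: rs) g 1 = false := by
    simp only [breakAt, show (1 : Nat) - 1 = 0 from rfl, List.getD_cons_succ,
      List.getD_cons_zero, decide_eq_false_iff_not]
    omega
  rw [alt_unfold g r0 (r1 :: rs), alt_unfold g r1 rs,
      breaks_cons g r0 (r1 :: rs) (by simp), hbr]
  have hlen : (r1 :: rs).length = rs.length + 1 := rfl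
  rw [hlen]
  simp only [Bool.false_eq_true, if_false, Nat.add_sub_cancel, List.nil_append]
  set B' := (List.range' 1 rs.length).filter (breakAt (r1 :: rs) g) with hB
  set t : List Nat := B' ++ [rs.length + 1] with ht
  obtain ⟨t0, t', htt⟩ : ∃ t0 t', t = t0 :: t' := by
    cases hBc : B' with
    | nil => exact ⟨rs.length + 1, [], by simp [ht, hBc]⟩
    | cons x l => exact ⟨x, l ++ [rs.length + 1], by simp [ht, hBc]⟩
  have hmem_t : ∀ u ∈ t, 1 ≤ u := fun u hu =>
    mem_t_ge_one g (r1 :: rs) (by simp) u (by simpa [ht, hB] using hu)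
  have ht0 : 1 ≤ t0 := hmem_t t0 (by rw [htt]; simp)
  have hshape : B'.map (· + 1) ++ [rs.length + 1 + 1] = t.map (· + 1) := by
    simp [ht]
  rw [hshape, htt]
  simp only [List.map_cons, List.zip_cons_cons, List.headD_cons, List.tail_cons]
  rw [show ((t0 + 1) :: t'.map (· + 1)) = (t0 :: t').map (· + 1) from by simp]
  rw [List.zip_map, List.map_map]
  have hmem : ∀ p ∈ (t0 :: t').zip t', 1 ≤ p.2 := by
    intro p hp
    exact hmem_t p.2 (by rw [htt]; exact List.mem_cons_of_mem _ (List.of_mem_zip hp).2)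
  have hes := emit_shift r0 (r1 :: rs) ((t0 :: t').zip t') hmem
  rw [List.map_map] at hes
  rw [hes]
  obtain ⟨c, rfl⟩ : ∃ c, t0 = c + 1 := ⟨t0 - 1, by omega⟩
  simp [emitF]

theorem alt_eq_goRuns (g : Int) (regions : List (Int × Int)) :
    merge_close_regions_alt regions g = goRuns g regions := by
  induction regions with
  | nil => simp [merge_close_regions_alt, goRuns]
  | cons r0 xs ih =>
      cases xs with
      | nil =>
          simp [merge_close_regions_alt, goRuns, splitFirst]
      | cons r1 rs =>
          by_cases h : r1.1 - r0.2 - 1 ≤ g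
          · rw [alt_cons_close g r0 r1 rs h, ih]
            rw [show goRuns g (r1 :: rs)
                  = (r1.1, (splitFirst g r1.2 rs).1)
                      :: goRuns g (splitFirst g r1.2 rs).2 from by rw [goRuns]]
            conv_rhs => rw [goRuns]
            simp [splitFirst, h]
          · rw [alt_cons_break g r0 r1 rs h, ih]
            conv_rhs => rw [goRuns]
            simp [splitFirst, h]

-- ===== VERDICT (by name: the statement is the Claim_ definition above) =====
theorem merge_close_regions_spec : Claim_equal_merge_close_regions := by
  intro regions g _
  unfold Spec_merge_close_regions
  rw [alt_eq_goRuns]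
  cases regions with
  | nil => simp [merge_close_regions, goRuns]
  | cons r0 rest =>
      simp only [merge_close_regions]
      rw [foldl_eq_goRuns g rest r0.1 r0.2, goRuns]
      simp
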